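-- pv_equiv track=rewrite | github.com/halekevi/SlateIQ | scripts/unified_grader_with_analytics.py | grade_ticket
-- ===== SOURCE A (Python) =====
-- from typing import Dict, List, Tuple
--
-- def grade_ticket(legs: List[str]) -> str:
--     """Grade a multi-leg ticket."""
--     void_count = sum(1 for leg in legs if leg == "VOID")
--     hit_count = sum(1 for leg in legs if leg == "HIT")
--
--     # All legs void = ticket void
--     if len(legs) - void_count == 0:
--         return "VOID"
--
--     # All non-void legs hit = ticket hit
--     if hit_count == len(legs) - void_count:
--         return "HIT"
--
--     # Otherwise miss
--     return "MISS"
-- ===== SOURCE B (Python) =====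
-- def grade_ticket(legs):
--     """Grade a multi-leg ticket."""
--     s = set(legs)
--     s.discard("VOID")
--     if not s:
--         return "VOID"
--     if s == {"HIT"}:
--         return "HIT"
--     return "MISS"
-- ===== Notes on version B (the rewrite author's own statement) =====
-- stated objective: simpler
-- what changed: Replaces the two counting passes and length arithmetic with one distinct-value set: build set(legs), discard 'VOID', and decide the grade by whether the remainder is empty or exactly {'HIT'}.
import Mathlib
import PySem

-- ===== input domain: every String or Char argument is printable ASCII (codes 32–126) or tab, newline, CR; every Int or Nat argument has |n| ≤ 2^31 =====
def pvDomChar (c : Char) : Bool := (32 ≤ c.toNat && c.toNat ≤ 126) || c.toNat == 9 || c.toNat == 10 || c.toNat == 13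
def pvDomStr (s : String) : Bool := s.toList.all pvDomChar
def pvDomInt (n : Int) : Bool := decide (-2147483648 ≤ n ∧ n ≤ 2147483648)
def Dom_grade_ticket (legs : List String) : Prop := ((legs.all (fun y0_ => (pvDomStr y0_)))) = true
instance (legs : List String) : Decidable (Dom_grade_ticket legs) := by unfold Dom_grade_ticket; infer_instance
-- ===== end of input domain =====

-- B replaces A's two counting passes and length arithmetic with a single distinct-value set
-- (set(legs) minus "VOID": empty → VOID, exactly {"HIT"} → HIT, else MISS); objective: simpler.


-- ===== PORT A =====
def grade_ticket (legs : List String) : String :=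
  let void_count : Int := legs.foldl (fun acc leg => if leg == "VOID" then acc + 1 else acc) 0
  let hit_count : Int := legs.foldl (fun acc leg => if leg == "HIT" then acc + 1 else acc) 0
  if (legs.length : Int) - void_count = 0 then "VOID"
  else if hit_count = (legs.length : Int) - void_count then "HIT"
  else "MISS"

-- ===== PORT B =====
def grade_ticket_alt (legs : List String) : String :=
  let s : PySem.Set String := (PySem.Set.ofList legs).discard "VOID"
  if s = [] then "VOID"
  else if PySem.Set.equal s ["HIT"] then "HIT"
  else "MISS"

-- ===== PRECONDITION & SPEC =====
def Spec_grade_ticket (legs : List String) (out : String) : Prop := out = grade_ticket_alt legs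
instance (legs : List String) (out : String) : Decidable (Spec_grade_ticket legs out) := by unfold Spec_grade_ticket; infer_instance

-- ===== CLAIM (what is proved, stated in full; the proofs are below) =====
def Claim_equal_grade_ticket : Prop := ∀ (legs : List String), Dom_grade_ticket legs → Spec_grade_ticket legs (grade_ticket legs)

-- ===== LEMMAS AND PROOFS =====

-- A's first test "len(legs) - void_count == 0" says every leg is "VOID".
lemma allvoid_iff (legs : List String) :
    (legs.length : Int) - (legs.countP (fun l => l == "VOID") : Int) = 0 ↔ ∀ l ∈ legs, l = "VOID" := by
  have hle := List.countP_le_length (p := fun l => l == "VOID") (l := legs)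
  rw [show ((legs.length : Int) - (legs.countP (fun l => l == "VOID") : Int) = 0 ↔
      legs.countP (fun l => l == "VOID") = legs.length) from by omega]
  rw [List.countP_eq_length]
  simp

-- B's first test: the set minus "VOID" is empty iff every leg is "VOID".
lemma empty_iff (legs : List String) :
    ((PySem.Set.ofList legs).discard "VOID" = []) ↔ ∀ l ∈ legs, l = "VOID" := by
  rw [List.eq_nil_iff_forall_not_mem]
  constructor
  · intro h l hl
    by_contra hne
    exact h l ((PySem.Set.mem_discard _ _ _).mpr ⟨(PySem.Set.mem_ofList _ _).mpr hl, hne⟩)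
  · intro h x hx
    obtain ⟨hxs, hne⟩ := (PySem.Set.mem_discard _ _ _).mp hx
    exact hne (h x ((PySem.Set.mem_ofList _ _).mp hxs))

-- counting: #HIT = #non-VOID iff every non-VOID leg is "HIT".
lemma cnt_iff (legs : List String) :
    legs.countP (fun l => l == "HIT") = legs.countP (fun l => !(l == "VOID")) ↔
      ∀ l ∈ legs, l ≠ "VOID" → l = "HIT" := by
  induction legs with
  | nil => simp
  | cons x xs ih =>
    have hle : xs.countP (fun l => l == "HIT") ≤ xs.countP (fun l => !(l == "VOID")) := by
      apply List.countP_mono_left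
      intro l _ hl
      simp_all
    by_cases hv : x = "VOID"
    · subst hv; simp [ih]
    · by_cases hh : x = "HIT"
      · subst hh
        simp [ih]
      · rw [List.countP_cons_of_neg (by simp [hh]), List.countP_cons_of_pos (by simp [hv])]
        constructor
        · intro h; exact absurd h (by omega)
        · intro h; exact absurd (h x (List.mem_cons_self) hv) hh

lemma len_split (legs : List String) :
    legs.length = legs.countP (fun l => l == "VOID") + legs.countP (fun l => !(l == "VOID")) := by
  induction legs with
  | nil => simp
  | cons x xs ih =>
    simp only [List.countP_cons, List.length_cons, ih]
    by_cases hv : x = "VOID" <;> simp [hv] <;> omega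

-- A's second test equals B's set-equality test, given not all legs are "VOID".
lemma hit_iff (legs : List String) (hnv : ¬ ∀ l ∈ legs, l = "VOID") :
    ((legs.countP (fun l => l == "HIT") : Int) =
        (legs.length : Int) - (legs.countP (fun l => l == "VOID") : Int)) ↔
      PySem.Set.equal ((PySem.Set.ofList legs).discard "VOID") ["HIT"] = true := by
  have hsplit := len_split legs
  rw [show (((legs.countP (fun l => l == "HIT") : Int) =
      (legs.length : Int) - (legs.countP (fun l => l == "VOID") : Int)) ↔
      legs.countP (fun l => l == "HIT") = legs.countP (fun l => !(l == "VOID"))) from by omega]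
  rw [cnt_iff, PySem.Set.equal_iff]
  rw [not_forall] at hnv
  simp only [not_forall, exists_prop] at hnv
  obtain ⟨w, hw, hwne⟩ := hnv
  constructor
  · intro h x
    simp only [PySem.Set.mem_discard, PySem.Set.mem_ofList, List.mem_singleton]
    constructor
    · rintro ⟨hx, hxne⟩; exact h x hx hxne
    · rintro rfl; exact ⟨by have := h w hw hwne; rwa [this] at hw, by decide⟩
  · intro h l hl hlne
    have := (h l).mp (by
      simp only [PySem.Set.mem_discard, PySem.Set.mem_ofList]
      exact ⟨hl, hlne⟩)
    simpa using this

-- ===== VERDICT (by name: the statement is the Claim_ definition above) =====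
theorem grade_ticket_spec : Claim_equal_grade_ticket := by
  intro legs _
  unfold Spec_grade_ticket grade_ticket grade_ticket_alt
  simp only [PySem.List.foldl_count_if, zero_add]
  by_cases h1 : ∀ l ∈ legs, l = "VOID"
  · rw [if_pos ((allvoid_iff legs).mpr h1), if_pos ((empty_iff legs).mpr h1)]
  · rw [if_neg (fun hc => h1 ((allvoid_iff legs).mp hc)),
        if_neg (fun hc => h1 ((empty_iff legs).mp hc))]
    by_cases h2 : (legs.countP (fun l => l == "HIT") : Int) =
        (legs.length : Int) - (legs.countP (fun l => l == "VOID") : Int)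
    · rw [if_pos h2, if_pos ((hit_iff legs h1).mp h2)]
    · rw [if_neg h2, if_neg (fun hc => h2 ((hit_iff legs h1).mpr hc))]
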